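-- pv_equiv track=rewrite | github.com/ArtiArtem8/PythonJokes | buckets_problem.py | pour_water_2
-- ===== SOURCE A (Python) =====
-- def pour_water_2(capacities: list[int], levels: list[int], W: int):
--     current = levels[:]
--     N = len(capacities)
--     while W > 0:
--         # Find all non-full buckets
--         non_full = [i for i in range(N) if current[i] < capacities[i]]
--         if not non_full:
--             break  # All buckets are full, can't pour more
--
--         # Find the minimum current among non-full buckets
--         min_current = min(current[i] for i in non_full)
--         current_buckets = [i for i in non_full if current[i] == min_current]
--
--         # Determine the next minimum current in non-full buckets not in current_buckets
--         others = [current[i] for i in non_full if i not in current_buckets]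
--         next_min = min(others) if others else float('inf')
--         delta_candidate = next_min - min_current if next_min != float('inf') else float('inf')
--
--         # Calculate the maximum delta we can pour
--         delta_max_per_bucket = min(capacities[i] - current[i] for i in current_buckets)
--         available_water = W // len(current_buckets)
--         delta = min(delta_candidate, delta_max_per_bucket, available_water)
--
--         if delta > 0:
--             for i in current_buckets:
--                 current[i] += delta
--             W -= delta * len(current_buckets)
--         else:
--             # Distribute remaining water one by one
--             pour = min(W, len(current_buckets))
--             for i in range(pour):
--                 current[current_buckets[i]] += 1
--             W -= pour
--
--     return current
-- ===== SOURCE B (Python) =====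
-- def pour_water_2(capacities: list[int], levels: list[int], W: int):
--     n = len(capacities)
--     result = levels[:]
--     if W <= 0:
--         return result
--     active = [i for i in range(n) if levels[i] < capacities[i]]
--     if not active:
--         return result
--
--     def cost(L):
--         return sum(min(L, capacities[i]) - levels[i] for i in active if levels[i] < L)
--
--     lo = min(levels[i] for i in active)
--     hi = max(capacities[i] for i in active)
--     # binary search: the largest water level L in [lo, hi] with cost(L) <= W
--     while lo < hi:
--         mid = (lo + hi + 1) // 2
--         if cost(mid) <= W:
--             lo = mid
--         else:
--             hi = mid - 1
--     L = lo
--     r = W - cost(L)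
--     for i in active:
--         if levels[i] < L:
--             result[i] = min(L, capacities[i])
--     for i in active:
--         if r > 0 and levels[i] <= L < capacities[i]:
--             result[i] += 1
--             r -= 1
--     return result
-- ===== Notes on version B (the rewrite author's own statement) =====
-- stated objective: faster
-- what changed: Replaces A's iterative simulation (repeatedly rescanning all buckets to raise the minimum-level group step by step) with a binary search for the final water level L over an analytic cost function, then writing each bucket's final value min(max(level,L),cap) directly and handing out the remainder one unit each to the lowest-index buckets sitting at L.
import Mathlib
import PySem

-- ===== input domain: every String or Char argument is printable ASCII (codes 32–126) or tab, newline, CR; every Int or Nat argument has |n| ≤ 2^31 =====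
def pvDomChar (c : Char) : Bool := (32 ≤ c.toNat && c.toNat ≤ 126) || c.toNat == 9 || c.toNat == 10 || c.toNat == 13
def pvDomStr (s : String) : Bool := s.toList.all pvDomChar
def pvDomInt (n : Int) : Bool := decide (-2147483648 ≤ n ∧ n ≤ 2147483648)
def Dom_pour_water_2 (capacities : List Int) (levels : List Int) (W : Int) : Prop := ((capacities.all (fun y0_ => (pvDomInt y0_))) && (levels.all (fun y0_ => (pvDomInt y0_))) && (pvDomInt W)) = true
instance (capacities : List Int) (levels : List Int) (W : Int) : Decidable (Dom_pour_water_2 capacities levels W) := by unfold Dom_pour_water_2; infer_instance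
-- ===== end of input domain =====

-- B replaces A's stepwise leveling simulation by a binary search for the final water level; proved equal
-- wherever A returns (Pre_: A raises IndexError when levels is shorter than capacities and W > 0).

-- ===== PORT A =====
-- A's locals, as helper definitions (indices are the Nats 0..N-1 of Python's range(N)):
def pwA_nonfull (caps cur : List Int) : List Nat :=
  (List.range caps.length).filter (fun i => decide (cur.getD i 0 < caps.getD i 0))
def pwA_minc (cur : List Int) (nf : List Nat) : Int :=
  ((nf.map (fun i => cur.getD i 0)).min?).getD 0
def pwA_cb (cur : List Int) (nf : List Nat) (mc : Int) : List Nat :=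
  nf.filter (fun i => decide (cur.getD i 0 = mc))
def pwA_others (cur : List Int) (nf cb : List Nat) : List Int :=
  (nf.filter (fun i => decide (¬ i ∈ cb))).map (fun i => cur.getD i 0)
def pwA_dmax (caps cur : List Int) (cb : List Nat) : Int :=
  ((cb.map (fun i => caps.getD i 0 - cur.getD i 0)).min?).getD 0
-- delta = min(delta_candidate, delta_max_per_bucket, available_water); candidate is +inf when others is empty
def pwA_delta (mc dmax avail : Int) (others : List Int) : Int :=
  match others.min? with
  | some next_min => min (min (next_min - mc) dmax) avail
  | none => min dmax avail

-- the while-loop; fuel = W.toNat is enough since W strictly decreases every iteration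
def pw2_loop (caps lvls : List Int) : Nat → List Int → Int → List Int
  | 0, cur, _ => cur
  | fuel+1, cur, W =>
    if 0 < W then
      let nf := pwA_nonfull caps cur
      if nf = [] then cur
      else
        let mc := pwA_minc cur nf
        let cb := pwA_cb cur nf mc
        if cb = [] then cur  -- unreachable totality guard (Python's min would raise on an empty sequence)
        else
          let dmax := pwA_dmax caps cur cb
          let avail := PySem.Int.floordiv W (cb.length : Int)
          let delta := pwA_delta mc dmax avail (pwA_others cur nf cb)
          if 0 < delta then
            pw2_loop caps lvls fuel (cb.foldl (fun c i => c.set i (c.getD i 0 + delta)) cur)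
              (W - delta * cb.length)
          else
            let pour := min W (cb.length : Int)
            pw2_loop caps lvls fuel
              ((List.range pour.toNat).foldl
                (fun c j => c.set (cb.getD j 0) (c.getD (cb.getD j 0) 0 + 1)) cur)
              (W - pour)
    else cur

def pour_water_2 (capacities : List Int) (levels : List Int) (W : Int) : List Int :=
  pw2_loop capacities levels W.toNat levels W

-- ===== PORT B =====
def pwB_cost (caps lvls : List Int) (active : List Nat) (L : Int) : Int :=
  ((active.filter (fun i => decide (lvls.getD i 0 < L))).map
    (fun i => min L (caps.getD i 0) - lvls.getD i 0)).sum

-- binary search: largest L in [lo, hi] with cost L ≤ W; fuel = (hi - lo).toNat is enough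
def pwB_bsearch (caps lvls : List Int) (active : List Nat) (W : Int) : Nat → Int → Int → Int
  | 0, lo, _ => lo
  | fuel+1, lo, hi =>
    if lo < hi then
      let mid := PySem.Int.floordiv (lo + hi + 1) 2
      if pwB_cost caps lvls active mid ≤ W then pwB_bsearch caps lvls active W fuel mid hi
      else pwB_bsearch caps lvls active W fuel lo (mid - 1)
    else lo

def pour_water_2_alt (capacities : List Int) (levels : List Int) (W : Int) : List Int :=
  if W ≤ 0 then levels
  else
    let active := (List.range capacities.length).filter
      (fun i => decide (levels.getD i 0 < capacities.getD i 0))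
    if active = [] then levels
    else
      let lo := ((active.map (fun i => levels.getD i 0)).min?).getD 0
      let hi := ((active.map (fun i => capacities.getD i 0)).max?).getD 0
      let L := pwB_bsearch capacities levels active W (hi - lo).toNat lo hi
      let r := W - pwB_cost capacities levels active L
      let res := active.foldl
        (fun res i => if levels.getD i 0 < L then res.set i (min L (capacities.getD i 0)) else res)
        levels
      (active.foldl
        (fun (st : List Int × Int) i =>
          if 0 < st.2 ∧ levels.getD i 0 ≤ L ∧ L < capacities.getD i 0
          then (st.1.set i (st.1.getD i 0 + 1), st.2 - 1) else st)
        (res, r)).1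

-- ===== PRECONDITION & SPEC =====
-- A raises IndexError iff W > 0 and len(levels) < len(capacities); those inputs are excluded.
def Pre_pour_water_2 (capacities : List Int) (levels : List Int) (W : Int) : Prop :=
  capacities.length ≤ levels.length ∨ W ≤ 0
instance (capacities : List Int) (levels : List Int) (W : Int) :
    Decidable (Pre_pour_water_2 capacities levels W) := by unfold Pre_pour_water_2; infer_instance
def pvWitness_pour_water_2 : List Int × List Int × Int := ([3, 5], [1, 2], 4)

def Spec_pour_water_2 (capacities : List Int) (levels : List Int) (W : Int) (out : List Int) : Prop := out = pour_water_2_alt capacities levels W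
instance (capacities : List Int) (levels : List Int) (W : Int) (out : List Int) : Decidable (Spec_pour_water_2 capacities levels W out) := by unfold Spec_pour_water_2; infer_instance

-- ===== CLAIM (what is proved, stated in full; the proofs are below) =====
def Claim_equal_pour_water_2 : Prop := ∀ (capacities : List Int) (levels : List Int) (W : Int), Dom_pour_water_2 capacities levels W → Pre_pour_water_2 capacities levels W → Spec_pour_water_2 capacities levels W (pour_water_2 capacities levels W)

-- ===== LEMMAS AND PROOFS =====

-- proof-side abbreviations: the water-fill profile pvV M, its cost, the "some bucket sits exactly at
-- level M and is not full" predicate, the eligible (exactly-at-M, non-full) index list, and the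
-- canonical list form canon f = [f 0, …, f (len-1)].
def pvV (caps lvls : List Int) (M : Int) (j : Nat) : Int :=
  if j < caps.length ∧ lvls.getD j 0 < caps.getD j 0
  then min (max (lvls.getD j 0) M) (caps.getD j 0) else lvls.getD j 0

def canon (lvls : List Int) (f : Nat → Int) : List Int := (List.range lvls.length).map f

def pvCostF (caps lvls : List Int) (M : Int) : Int :=
  ∑ j ∈ Finset.range caps.length, (pvV caps lvls M j - lvls.getD j 0)

def pvTight (caps lvls : List Int) (M : Int) : Prop :=
  ∃ j, j < caps.length ∧ lvls.getD j 0 ≤ M ∧ M < caps.getD j 0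

def pvElig (caps lvls : List Int) (M : Int) : List Nat :=
  (List.range caps.length).filter (fun j => decide (lvls.getD j 0 ≤ M ∧ M < caps.getD j 0))

def pvNF (caps lvls : List Int) (M r : Int) : List Int :=
  canon lvls (fun j => if j ∈ (pvElig caps lvls M).take r.toNat
    then pvV caps lvls M j + 1 else pvV caps lvls M j)

def pvActive (caps lvls : List Int) : List Nat :=
  (List.range caps.length).filter (fun i => decide (lvls.getD i 0 < caps.getD i 0))


-- ----- generic facts about canon and folds of sets -----

theorem pv_getD_canon (lvls : List Int) (f : Nat → Int) (j : Nat) :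
    (canon lvls f).getD j 0 = if j < lvls.length then f j else 0 := by
  rcases lt_or_ge j lvls.length with h | h
  · rw [if_pos h, List.getD_eq_getElem _ _ (by simpa [canon] using h)]
    simp [canon]
  · rw [if_neg (by omega), List.getD_eq_default _ _ (by simpa [canon] using h)]

theorem pv_canon_congr (lvls : List Int) (f g : Nat → Int)
    (h : ∀ j, j < lvls.length → f j = g j) : canon lvls f = canon lvls g := by
  apply List.map_congr_left
  intro j hj; exact h j (List.mem_range.mp hj)

theorem pv_canon_self (lvls : List Int) : canon lvls (fun j => lvls.getD j 0) = lvls := by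
  apply List.ext_getElem (by simp [canon])
  intro j h1 h2
  simp [canon, List.getD_eq_getElem?_getD, List.getElem?_eq_getElem h2]

theorem pv_set_canon (lvls : List Int) (f : Nat → Int) (j : Nat) (x : Int) :
    (canon lvls f).set j x = canon lvls (fun j' => if j' = j then x else f j') := by
  apply List.ext_getElem (by simp [canon])
  intro k h1 h2
  simp only [canon] at *
  rw [List.getElem_set]
  simp only [List.getElem_map, List.getElem_range]
  split_ifs with h3 h4 h4 <;> first | rfl | omega

theorem pv_condSetFold (lvls : List Int) (p : Nat → Prop) [DecidablePred p] (g : Nat → Int) :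
    ∀ (is : List Nat) (f : Nat → Int), (∀ i ∈ is, i < lvls.length) →
    is.foldl (fun res i => if p i then res.set i (g i) else res) (canon lvls f)
      = canon lvls (fun j => if j ∈ is ∧ p j then g j else f j) := by
  intro is
  induction is with
  | nil => intro f _; simp
  | cons i rest ih =>
    intro f hb
    by_cases hp : p i
    · simp only [List.foldl_cons, hp, if_pos]
      rw [pv_set_canon, ih _ (fun a ha => hb a (by simp [ha]))]
      apply pv_canon_congr
      intro j hj
      by_cases hjr : j ∈ rest <;> by_cases hpj : p j <;> by_cases hji : j = i <;>
        simp_all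
    · simp only [List.foldl_cons, hp, if_neg, not_false_iff]
      rw [ih _ (fun a ha => hb a (by simp [ha]))]
      apply pv_canon_congr
      intro j hj
      by_cases hjr : j ∈ rest <;> by_cases hpj : p j <;> by_cases hji : j = i <;>
        simp_all

theorem pv_addFold (lvls : List Int) (d : Int) :
    ∀ (is : List Nat) (f : Nat → Int), is.Nodup → (∀ i ∈ is, i < lvls.length) →
    is.foldl (fun res i => res.set i (res.getD i 0 + d)) (canon lvls f)
      = canon lvls (fun j => if j ∈ is then f j + d else f j) := by
  intro is
  induction is with
  | nil => intro f _ _; simp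
  | cons i rest ih =>
    intro f hnd hb
    have hi : i < lvls.length := hb i (by simp)
    have hget : (canon lvls f).getD i 0 = f i := by rw [pv_getD_canon, if_pos hi]
    simp only [List.foldl_cons, hget]
    rw [pv_set_canon, ih _ hnd.of_cons (fun a ha => hb a (by simp [ha]))]
    apply pv_canon_congr
    intro j hj
    have hir : i ∉ rest := (List.nodup_cons.mp hnd).1
    by_cases hjr : j ∈ rest <;> by_cases hji : j = i <;> simp_all

-- B's remainder loop: +1 to the first r (by position) indices satisfying p
theorem pv_onesFold (lvls : List Int) (p : Nat → Prop) [DecidablePred p] :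
    ∀ (is : List Nat) (f : Nat → Int) (r : Int), is.Nodup → (∀ i ∈ is, i < lvls.length) →
    is.foldl (fun (st : List Int × Int) i =>
        if 0 < st.2 ∧ p i then (st.1.set i (st.1.getD i 0 + 1), st.2 - 1) else st)
      (canon lvls f, r)
      = (canon lvls (fun j => if j ∈ (is.filter (fun i => decide (p i))).take r.toNat
          then f j + 1 else f j),
         r - ((is.filter (fun i => decide (p i))).take r.toNat).length) := by
  intro is
  induction is with
  | nil => intro f r _ _; simp
  | cons i rest ih =>
    intro f r hnd hb
    have hir : i ∉ rest := (List.nodup_cons.mp hnd).1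
    have hi : i < lvls.length := hb i (by simp)
    by_cases hc : 0 < r ∧ p i
    · have hget : (canon lvls f).getD i 0 = f i := by rw [pv_getD_canon, if_pos hi]
      simp only [List.foldl_cons, if_pos hc, hget]
      rw [pv_set_canon, ih _ (r - 1) hnd.of_cons (fun a ha => hb a (by simp [ha]))]
      have htak : ((i :: rest).filter (fun i => decide (p i))).take r.toNat
          = i :: ((rest.filter (fun i => decide (p i))).take (r - 1).toNat) := by
        have h1 : r.toNat = (r - 1).toNat + 1 := by omega
        rw [List.filter_cons_of_pos (by simp [hc.2]), h1, List.take_succ_cons]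
      simp only [Prod.mk.injEq]
      refine ⟨?_, ?_⟩
      · rw [htak]
        apply pv_canon_congr
        intro j hj
        by_cases hji : j = i
        · subst hji
          have hjt : j ∉ (rest.filter (fun i => decide (p i))).take (r.toNat - 1) :=
            fun h => hir (List.mem_of_mem_filter (List.mem_of_mem_take h))
          simp [hjt]
        · by_cases hjt : j ∈ (rest.filter (fun i => decide (p i))).take (r.toNat - 1) <;>
            simp [hjt, hji]
      · rw [htak]; simp; omega
    · simp only [List.foldl_cons, if_neg hc]
      rw [ih _ r hnd.of_cons (fun a ha => hb a (by simp [ha]))]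
      rcases (not_and_or.mp hc) with hr | hp
      · have hr0 : r.toNat = 0 := by omega
        simp [hr0]
      · have : ((i :: rest).filter (fun i => decide (p i))) = rest.filter (fun i => decide (p i)) := by
          simp [hp]
        rw [this]

-- A's remainder loop: indexing cb[j] for j < pour turns into a fold over cb.take pour
theorem pv_rangeIdxFold (m : Nat) (is : List Nat) (hm : m ≤ is.length) (cur : List Int) :
    (List.range m).foldl (fun c j => c.set (is.getD j 0) (c.getD (is.getD j 0) 0 + 1)) cur
      = (is.take m).foldl (fun c i => c.set i (c.getD i 0 + 1)) cur := by
  have hmap : (List.range m).map (fun j => is.getD j 0) = is.take m := by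
    apply List.ext_getElem (by simp; omega)
    intro j h1 h2
    simp only [List.getElem_map, List.getElem_range, List.getElem_take]
    rw [List.getD_eq_getElem _ _ (by simp at h1 ⊢; omega)]
  rw [← hmap, List.foldl_map]

-- list-filter sums as Finset.range sums
theorem pv_sum_filter_map (n : Nat) (p : Nat → Bool) (g : Nat → Int) :
    (((List.range n).filter p).map g).sum = ∑ j ∈ Finset.range n, if p j then g j else 0 := by
  induction n with
  | zero => simp
  | succ n ih =>
    rw [List.range_succ, List.filter_append, List.map_append, List.sum_append,
      Finset.sum_range_succ, ih]
    by_cases h : p n <;> simp [h]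

theorem pv_len_filter (n : Nat) (p : Nat → Bool) :
    ((((List.range n).filter p).length : Int)) = ∑ j ∈ Finset.range n, if p j then (1 : Int) else 0 := by
  induction n with
  | zero => simp
  | succ n ih =>
    rw [List.range_succ, List.filter_append, Finset.sum_range_succ, ← ih]
    by_cases h : p n <;> simp [h]


-- ----- min?/max? of nonempty lists -----
theorem pv_minD_spec (xs : List Int) (h : xs ≠ []) :
    (xs.min?).getD 0 ∈ xs ∧ ∀ b ∈ xs, (xs.min?).getD 0 ≤ b := by
  cases hm : xs.min? with
  | none => exact absurd (List.min?_eq_none_iff.mp hm) h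
  | some a => simpa using List.min?_eq_some_iff.mp hm

theorem pv_maxD_spec (xs : List Int) (h : xs ≠ []) :
    (xs.max?).getD 0 ∈ xs ∧ ∀ b ∈ xs, b ≤ (xs.max?).getD 0 := by
  cases hm : xs.max? with
  | none => exact absurd (List.max?_eq_none_iff.mp hm) h
  | some a => simpa using List.max?_eq_some_iff.mp hm

-- ----- membership / nodup of the index lists -----
theorem pv_mem_elig (caps lvls : List Int) (M : Int) (j : Nat) :
    j ∈ pvElig caps lvls M ↔ j < caps.length ∧ lvls.getD j 0 ≤ M ∧ M < caps.getD j 0 := by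
  simp [pvElig]

theorem pv_mem_active (caps lvls : List Int) (j : Nat) :
    j ∈ pvActive caps lvls ↔ j < caps.length ∧ lvls.getD j 0 < caps.getD j 0 := by
  simp [pvActive]

theorem pv_elig_nodup (caps lvls : List Int) (M : Int) : (pvElig caps lvls M).Nodup :=
  (List.nodup_range).filter _

theorem pv_active_nodup (caps lvls : List Int) : (pvActive caps lvls).Nodup :=
  (List.nodup_range).filter _

-- ----- facts about the cost function -----
theorem pv_costF_nonneg (caps lvls : List Int) (M : Int) : 0 ≤ pvCostF caps lvls M := by
  apply Finset.sum_nonneg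
  intro j _
  simp only [pvV]; split_ifs <;> omega

theorem pv_costF_mono (caps lvls : List Int) {M M' : Int} (h : M ≤ M') :
    pvCostF caps lvls M ≤ pvCostF caps lvls M' := by
  apply Finset.sum_le_sum
  intro j _
  simp only [pvV]; split_ifs <;> omega

theorem pv_costF_congr (caps lvls : List Int) {M M' : Int}
    (h : ∀ j, j < caps.length → pvV caps lvls M j = pvV caps lvls M' j) :
    pvCostF caps lvls M = pvCostF caps lvls M' := by
  apply Finset.sum_congr rfl
  intro j hj
  rw [h j (Finset.mem_range.mp hj)]

theorem pv_sum_ite_const (n : Nat) (p : Nat → Bool) (d : Int) :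
    (∑ j ∈ Finset.range n, if p j then d else 0)
      = d * (((List.range n).filter p).length : Int) := by
  rw [pv_len_filter, Finset.mul_sum]
  apply Finset.sum_congr rfl
  intro j _
  by_cases h : p j <;> simp [h]

theorem pv_costF_succ (caps lvls : List Int) (M : Int) :
    pvCostF caps lvls (M + 1)
      = pvCostF caps lvls M + ((pvElig caps lvls M).length : Int) := by
  have hpt : ∀ j ∈ Finset.range caps.length,
      pvV caps lvls (M + 1) j - lvls.getD j 0
        = (pvV caps lvls M j - lvls.getD j 0)
          + (if (fun j => decide (lvls.getD j 0 ≤ M ∧ M < caps.getD j 0)) j then (1:Int) else 0) := by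
    intro j hj
    have hj' := Finset.mem_range.mp hj
    simp only [decide_eq_true_eq]
    simp only [pvV]; split_ifs <;> omega
  rw [pvCostF, Finset.sum_congr rfl hpt, Finset.sum_add_distrib,
    pv_sum_ite_const, ← pvCostF]
  simp [pvElig]

theorem pv_costF_of_pointwise (caps lvls : List Int) {M M' d : Int}
    (h : ∀ j, j < caps.length →
      pvV caps lvls M' j = if j ∈ pvElig caps lvls M then pvV caps lvls M j + d
        else pvV caps lvls M j) :
    pvCostF caps lvls M' = pvCostF caps lvls M + d * ((pvElig caps lvls M).length : Int) := by
  have hpt : ∀ j ∈ Finset.range caps.length,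
      pvV caps lvls M' j - lvls.getD j 0
        = (pvV caps lvls M j - lvls.getD j 0)
          + (if (fun j => decide (lvls.getD j 0 ≤ M ∧ M < caps.getD j 0)) j then d else 0) := by
    intro j hj
    have hj' := Finset.mem_range.mp hj
    rw [h j hj']
    by_cases hm : j ∈ pvElig caps lvls M
    · have := (pv_mem_elig caps lvls M j).mp hm
      rw [if_pos hm, if_pos (by simp only [decide_eq_true_eq]; exact ⟨this.2.1, this.2.2⟩)]
      ring
    · have : ¬ (lvls.getD j 0 ≤ M ∧ M < caps.getD j 0) := by
        intro hc
        exact hm ((pv_mem_elig caps lvls M j).mpr ⟨hj', hc.1, hc.2⟩)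
      rw [if_neg hm, if_neg (by simp only [decide_eq_true_eq]; exact this)]
      ring
  rw [pvCostF, Finset.sum_congr rfl hpt, Finset.sum_add_distrib, pv_sum_ite_const, ← pvCostF]
  simp [pvElig]


-- ----- B's cost equals the analytic cost -----
theorem pv_cost_eq (caps lvls : List Int) (L : Int) :
    pwB_cost caps lvls (pvActive caps lvls) L = pvCostF caps lvls L := by
  rw [pwB_cost, pvActive, List.filter_filter, pv_sum_filter_map, pvCostF]
  apply Finset.sum_congr rfl
  intro j hj
  have hj' := Finset.mem_range.mp hj
  by_cases h2 : lvls.getD j 0 < caps.getD j 0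
  · by_cases h1 : lvls.getD j 0 < L
    · rw [if_pos (by simp only [Bool.and_eq_true, decide_eq_true_eq]; exact ⟨h1, h2⟩)]
      simp only [pvV]; split_ifs <;> omega
    · rw [if_neg (by simp only [Bool.and_eq_true, decide_eq_true_eq]; exact fun hc => h1 hc.1)]
      simp only [pvV]; split_ifs <;> omega
  · rw [if_neg (by simp only [Bool.and_eq_true, decide_eq_true_eq]; exact fun hc => h2 hc.2)]
    simp only [pvV]; split_ifs <;> omega

-- ----- binary-search characterization -----
theorem pv_bsearch_spec (caps lvls : List Int) (active : List Nat) (W : Int) :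
    ∀ (fuel : Nat) (lo hi : Int), (hi - lo).toNat ≤ fuel → lo ≤ hi →
      pwB_cost caps lvls active lo ≤ W →
      lo ≤ pwB_bsearch caps lvls active W fuel lo hi ∧
      pwB_bsearch caps lvls active W fuel lo hi ≤ hi ∧
      pwB_cost caps lvls active (pwB_bsearch caps lvls active W fuel lo hi) ≤ W ∧
      (pwB_bsearch caps lvls active W fuel lo hi < hi →
        W < pwB_cost caps lvls active (pwB_bsearch caps lvls active W fuel lo hi + 1)) := by
  intro fuel
  induction fuel with
  | zero =>
    intro lo hi h1 h2 h3
    have : lo = hi := by omega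
    subst this
    simp only [pwB_bsearch]
    exact ⟨le_refl _, le_refl _, h3, by omega⟩
  | succ fuel ih =>
    intro lo hi h1 h2 h3
    simp only [pwB_bsearch]
    by_cases hlh : lo < hi
    · rw [if_pos hlh]
      have hmid : lo < PySem.Int.floordiv (lo + hi + 1) 2 ∧
          PySem.Int.floordiv (lo + hi + 1) 2 ≤ hi := by
        rw [PySem.Int.floordiv_eq_ediv_of_pos (by norm_num)]
        omega
      by_cases hc : pwB_cost caps lvls active (PySem.Int.floordiv (lo + hi + 1) 2) ≤ W
      · rw [if_pos hc]
        have := ih (PySem.Int.floordiv (lo + hi + 1) 2) hi (by omega) (by omega) hc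
        exact ⟨by omega, this.2.1, this.2.2.1, this.2.2.2⟩
      · rw [if_neg hc]
        have := ih lo (PySem.Int.floordiv (lo + hi + 1) 2 - 1) (by omega) (by omega) h3
        refine ⟨this.1, by omega, this.2.2.1, ?_⟩
        intro _
        by_cases hend : pwB_bsearch caps lvls active W fuel lo
            (PySem.Int.floordiv (lo + hi + 1) 2 - 1) < PySem.Int.floordiv (lo + hi + 1) 2 - 1
        · exact this.2.2.2 hend
        · have heq : pwB_bsearch caps lvls active W fuel lo
              (PySem.Int.floordiv (lo + hi + 1) 2 - 1) = PySem.Int.floordiv (lo + hi + 1) 2 - 1 := by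
            omega
          rw [heq, sub_add_cancel]
          omega
    · rw [if_neg hlh]
      exact ⟨le_refl _, h2, h3, by omega⟩

-- the level with cost ≤ W whose successor exceeds W is unique below hi
theorem pv_level_unique (caps lvls : List Int) {W hi M M' : Int}
    (h1 : M ≤ hi) (h2 : pvCostF caps lvls M ≤ W)
    (h3 : M < hi → W < pvCostF caps lvls (M + 1))
    (h1' : M' ≤ hi) (h2' : pvCostF caps lvls M' ≤ W)
    (h3' : M' < hi → W < pvCostF caps lvls (M' + 1)) : M = M' := by
  rcases lt_trichotomy M M' with h | h | h
  · exfalso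
    have := h3 (by omega)
    have := pv_costF_mono caps lvls (show M + 1 ≤ M' by omega)
    omega
  · exact h
  · exfalso
    have := h3' (by omega)
    have := pv_costF_mono caps lvls (show M' + 1 ≤ M by omega)
    omega


def pvLo (caps lvls : List Int) : Int :=
  (((pvActive caps lvls).map (fun i => lvls.getD i 0)).min?).getD 0
def pvHi (caps lvls : List Int) : Int :=
  (((pvActive caps lvls).map (fun i => caps.getD i 0)).max?).getD 0

theorem pv_active_filter_elig (caps lvls : List Int) (M : Int) :
    (pvActive caps lvls).filter
      (fun i => decide (lvls.getD i 0 ≤ M ∧ M < caps.getD i 0)) = pvElig caps lvls M := by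
  rw [pvActive, List.filter_filter, pvElig]
  apply List.filter_congr
  intro j _
  simp; omega

-- B's output, characterized: for any level M in [lo, hi] with cost M ≤ W < cost (M+1),
-- B returns the fill profile at M plus one extra unit on the first (W - cost M) buckets sitting at M.
theorem pv_alt_char (caps lvls : List Int) (W M : Int)
    (hpre : caps.length ≤ lvls.length) (hW : 0 < W) (hact : pvActive caps lvls ≠ [])
    (hlo : pvLo caps lvls ≤ M) (hhi : M ≤ pvHi caps lvls)
    (hcost : pvCostF caps lvls M ≤ W)
    (hsucc : M < pvHi caps lvls → W < pvCostF caps lvls (M + 1)) :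
    pour_water_2_alt caps lvls W = pvNF caps lvls M (W - pvCostF caps lvls M) := by
  have hb : ∀ i ∈ pvActive caps lvls, i < lvls.length := by
    intro i hi
    have := (pv_mem_active caps lvls i).mp hi
    omega
  have hbs := pv_bsearch_spec caps lvls (pvActive caps lvls) W
    (pvHi caps lvls - pvLo caps lvls).toNat (pvLo caps lvls) (pvHi caps lvls)
    (le_refl _) (le_trans hlo hhi)
    (by rw [pv_cost_eq]; exact le_trans (pv_costF_mono caps lvls hlo) hcost)
  rw [pv_cost_eq, pv_cost_eq] at hbs
  have hLM : pwB_bsearch caps lvls (pvActive caps lvls) W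
      (pvHi caps lvls - pvLo caps lvls).toNat (pvLo caps lvls) (pvHi caps lvls) = M :=
    pv_level_unique caps lvls hbs.2.1 hbs.2.2.1 hbs.2.2.2 hhi hcost hsucc
  simp only [pour_water_2_alt]
  rw [show (List.range caps.length).filter
      (fun i => decide (lvls.getD i 0 < caps.getD i 0)) = pvActive caps lvls from rfl]
  rw [if_neg (not_le.mpr hW), if_neg hact]
  rw [show (((pvActive caps lvls).map (fun i => lvls.getD i 0)).min?).getD 0
      = pvLo caps lvls from rfl]
  rw [show (((pvActive caps lvls).map (fun i => caps.getD i 0)).max?).getD 0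
      = pvHi caps lvls from rfl]
  rw [hLM, pv_cost_eq]
  have hfold1 := pv_condSetFold lvls (fun i => lvls.getD i 0 < M)
    (fun i => min M (caps.getD i 0)) (pvActive caps lvls) (fun j => lvls.getD j 0) hb
  rw [pv_canon_self] at hfold1
  rw [hfold1]
  have hcan : canon lvls (fun j => if j ∈ pvActive caps lvls ∧ lvls.getD j 0 < M
      then min M (caps.getD j 0) else lvls.getD j 0) = canon lvls (pvV caps lvls M) := by
    apply pv_canon_congr
    intro j hj
    by_cases h1 : j ∈ pvActive caps lvls
    · have ha := (pv_mem_active caps lvls j).mp h1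
      by_cases h2 : lvls.getD j 0 < M
      · rw [if_pos ⟨h1, h2⟩]
        simp only [pvV]; split_ifs <;> omega
      · rw [if_neg (fun hc => h2 hc.2)]
        simp only [pvV]; split_ifs <;> omega
    · rw [if_neg (fun hc => h1 hc.1)]
      have hna : ¬ (j < caps.length ∧ lvls.getD j 0 < caps.getD j 0) :=
        fun hc => h1 ((pv_mem_active caps lvls j).mpr hc)
      simp only [pvV]
      rw [if_neg hna]
  rw [hcan]
  have hfold2 := pv_onesFold lvls (fun i => lvls.getD i 0 ≤ M ∧ M < caps.getD i 0)
    (pvActive caps lvls) (pvV caps lvls M) (W - pvCostF caps lvls M)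
    (pv_active_nodup caps lvls) hb
  rw [hfold2, pv_active_filter_elig]
  rfl


-- ----- A's loop at a fill-profile state: each local, characterized -----
def pvNfl (caps lvls : List Int) (M : Int) : List Nat :=
  (List.range caps.length).filter (fun i => decide (pvV caps lvls M i < caps.getD i 0))
def pvOth (caps lvls : List Int) (M : Int) : List Nat :=
  (List.range caps.length).filter
    (fun i => decide (lvls.getD i 0 < caps.getD i 0 ∧ M < lvls.getD i 0))

theorem pv_mem_nfl (caps lvls : List Int) (M : Int) (j : Nat) :
    j ∈ pvNfl caps lvls M ↔ j < caps.length ∧ pvV caps lvls M j < caps.getD j 0 := by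
  simp [pvNfl]

theorem pv_mem_oth (caps lvls : List Int) (M : Int) (j : Nat) :
    j ∈ pvOth caps lvls M ↔ j < caps.length ∧ lvls.getD j 0 < caps.getD j 0 ∧ M < lvls.getD j 0 := by
  simp [pvOth]

theorem pv_getD_state (caps lvls : List Int) (M : Int) (hpre : caps.length ≤ lvls.length)
    (j : Nat) (hj : j < caps.length) :
    (canon lvls (pvV caps lvls M)).getD j 0 = pvV caps lvls M j := by
  rw [pv_getD_canon, if_pos (by omega)]

theorem pvA_nonfull_eq (caps lvls : List Int) (M : Int) (hpre : caps.length ≤ lvls.length) :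
    pwA_nonfull caps (canon lvls (pvV caps lvls M)) = pvNfl caps lvls M := by
  rw [pwA_nonfull, pvNfl]
  apply List.filter_congr
  intro j hj
  rw [pv_getD_state caps lvls M hpre j (List.mem_range.mp hj)]

theorem pvA_minc_eq (caps lvls : List Int) (M : Int) (hpre : caps.length ≤ lvls.length)
    (hT : pvTight caps lvls M) :
    pwA_minc (canon lvls (pvV caps lvls M)) (pvNfl caps lvls M) = M := by
  obtain ⟨j0, hj0, hl0, hc0⟩ := hT
  have hv0 : pvV caps lvls M j0 = M := by simp only [pvV]; split_ifs <;> omega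
  have hmem : j0 ∈ pvNfl caps lvls M := (pv_mem_nfl caps lvls M j0).mpr ⟨hj0, by omega⟩
  rw [pwA_minc]
  have hmap : ((pvNfl caps lvls M).map
      (fun i => (canon lvls (pvV caps lvls M)).getD i 0)).min? = some M := by
    rw [List.min?_eq_some_iff]
    constructor
    · exact List.mem_map.mpr ⟨j0, hmem, by
        rw [pv_getD_state caps lvls M hpre j0 hj0, hv0]⟩
    · intro b hb
      obtain ⟨i, hi, hib⟩ := List.mem_map.mp hb
      have hi' := (pv_mem_nfl caps lvls M i).mp hi
      rw [pv_getD_state caps lvls M hpre i hi'.1] at hib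
      subst hib
      have := hi'.2
      simp only [pvV] at *
      split_ifs at * <;> omega
  rw [hmap]
  rfl

theorem pvA_cb_eq (caps lvls : List Int) (M : Int) (hpre : caps.length ≤ lvls.length) :
    pwA_cb (canon lvls (pvV caps lvls M)) (pvNfl caps lvls M) M = pvElig caps lvls M := by
  rw [pwA_cb, pvNfl, List.filter_filter, pvElig]
  apply List.filter_congr
  intro j hj
  have hj' := List.mem_range.mp hj
  rw [pv_getD_state caps lvls M hpre j hj']
  rw [← Bool.decide_and]
  exact decide_eq_decide.mpr (by simp only [pvV]; split_ifs <;> omega)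

theorem pvA_others_eq (caps lvls : List Int) (M : Int) (hpre : caps.length ≤ lvls.length) :
    pwA_others (canon lvls (pvV caps lvls M)) (pvNfl caps lvls M) (pvElig caps lvls M)
      = (pvOth caps lvls M).map (fun i => lvls.getD i 0) := by
  rw [pwA_others]
  have hfil : (pvNfl caps lvls M).filter (fun i => decide (¬ i ∈ pvElig caps lvls M))
      = pvOth caps lvls M := by
    rw [pvNfl, List.filter_filter, pvOth]
    apply List.filter_congr
    intro j hj
    have hj' := List.mem_range.mp hj
    rw [← Bool.decide_and]
    refine decide_eq_decide.mpr ?_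
    rw [pv_mem_elig]
    simp only [pvV]; split_ifs <;> omega
  rw [hfil]
  apply List.map_congr_left
  intro j hj
  have hj' := (pv_mem_oth caps lvls M j).mp hj
  rw [pv_getD_state caps lvls M hpre j hj'.1]
  simp only [pvV]; split_ifs <;> omega

theorem pvA_dmax_eq (caps lvls : List Int) (M : Int) (hpre : caps.length ≤ lvls.length) :
    pwA_dmax caps (canon lvls (pvV caps lvls M)) (pvElig caps lvls M)
      = (((pvElig caps lvls M).map (fun i => caps.getD i 0 - M)).min?).getD 0 := by
  rw [pwA_dmax]
  congr 1
  congr 1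
  apply List.map_congr_left
  intro j hj
  have hj' := (pv_mem_elig caps lvls M j).mp hj
  rw [pv_getD_state caps lvls M hpre j hj'.1]
  have : pvV caps lvls M j = M := by simp only [pvV]; split_ifs <;> omega
  rw [this]


theorem pv_loop_stuck (caps lvls : List Int) (fuel : Nat) (cur : List Int) (W : Int)
    (h : W ≤ 0 ∨ pwA_nonfull caps cur = []) : pw2_loop caps lvls fuel cur W = cur := by
  cases fuel with
  | zero => rfl
  | succ fuel =>
    simp only [pw2_loop]
    rcases h with h | h
    · rw [if_neg (by omega)]
    · by_cases hw : 0 < W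
      · rw [if_pos hw, if_pos h]
      · rw [if_neg hw]

theorem pv_tight_bounds (caps lvls : List Int) {M : Int} (hT : pvTight caps lvls M) :
    pvActive caps lvls ≠ [] ∧ pvLo caps lvls ≤ M ∧ M ≤ pvHi caps lvls := by
  obtain ⟨j0, hj0, hl0, hc0⟩ := hT
  have hact : j0 ∈ pvActive caps lvls := (pv_mem_active caps lvls j0).mpr ⟨hj0, by omega⟩
  have hne : pvActive caps lvls ≠ [] := List.ne_nil_of_mem hact
  have hmaplne : (pvActive caps lvls).map (fun i => lvls.getD i 0) ≠ [] := by
    simp [hne]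
  have hmapcne : (pvActive caps lvls).map (fun i => caps.getD i 0) ≠ [] := by
    simp [hne]
  have h1 := (pv_minD_spec _ hmaplne).2 (lvls.getD j0 0)
    (List.mem_map.mpr ⟨j0, hact, rfl⟩)
  have h2 := (pv_maxD_spec _ hmapcne).2 (caps.getD j0 0)
    (List.mem_map.mpr ⟨j0, hact, rfl⟩)
  exact ⟨hne, by rw [pvLo]; omega, by rw [pvHi]; omega⟩

theorem pv_tight_elig_ne (caps lvls : List Int) {M : Int} (hT : pvTight caps lvls M) :
    pvElig caps lvls M ≠ [] := by
  obtain ⟨j0, hj0, hl0, hc0⟩ := hT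
  exact List.ne_nil_of_mem ((pv_mem_elig caps lvls M j0).mpr ⟨hj0, hl0, hc0⟩)

-- the terminal W = 0 case: the current fill profile is exactly B's answer for budget cost(M)
theorem pv_end (caps lvls : List Int) (M : Int) (hpre : caps.length ≤ lvls.length)
    (hT : pvTight caps lvls M) :
    canon lvls (pvV caps lvls M) = pour_water_2_alt caps lvls (pvCostF caps lvls M) := by
  obtain ⟨hact, hlo, hhi⟩ := pv_tight_bounds caps lvls hT
  by_cases h0 : pvCostF caps lvls M ≤ 0
  · have h00 : pvCostF caps lvls M = 0 := le_antisymm h0 (pv_costF_nonneg caps lvls M)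
    have hterm : ∀ j ∈ Finset.range caps.length, pvV caps lvls M j - lvls.getD j 0 = 0 :=
      (Finset.sum_eq_zero_iff_of_nonneg
        (fun j _ => by simp only [pvV]; split_ifs <;> omega)).mp h00
    simp only [pour_water_2_alt]
    rw [if_pos (by omega)]
    calc canon lvls (pvV caps lvls M) = canon lvls (fun j => lvls.getD j 0) := by
          apply pv_canon_congr
          intro j hj
          by_cases hjn : j < caps.length
          · have := hterm j (Finset.mem_range.mpr hjn)
            omega
          · simp only [pvV]
            rw [if_neg (fun hc => hjn hc.1)]
      _ = lvls := pv_canon_self lvls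
  · rw [pv_alt_char caps lvls (pvCostF caps lvls M) M hpre (by omega) hact hlo hhi
      (le_refl _) ?_]
    · rw [sub_self]
      unfold pvNF
      apply pv_canon_congr
      intro j hj
      simp
    · intro _
      rw [pv_costF_succ]
      have hne := pv_tight_elig_ne caps lvls hT
      have : 0 < (pvElig caps lvls M).length := List.length_pos_iff.mpr hne
      omega


theorem pv_canon_V_congr (caps lvls : List Int) {X Y : Int}
    (h : ∀ j, j < caps.length → pvV caps lvls X j = pvV caps lvls Y j) :
    canon lvls (pvV caps lvls X) = canon lvls (pvV caps lvls Y) := by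
  apply pv_canon_congr
  intro j hj
  by_cases hjn : j < caps.length
  · exact h j hjn
  · simp only [pvV]
    rw [if_neg (fun hc => hjn hc.1), if_neg (fun hc => hjn hc.1)]

-- one analytic iteration of A: pouring δ into every minimum bucket moves the profile from M to M + δ
theorem pv_step (caps lvls : List Int) (hpre : caps.length ≤ lvls.length)
    (fuel : Nat) (W M δ : Int)
    (ih : ∀ (W' M' : Int), W'.toNat ≤ fuel → 0 ≤ W' → pvTight caps lvls M' →
      pw2_loop caps lvls fuel (canon lvls (pvV caps lvls M')) W'
        = pour_water_2_alt caps lvls (pvCostF caps lvls M' + W'))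
    (hf : W.toNat ≤ fuel + 1) (hW : 0 < W) (hT : pvTight caps lvls M)
    (hδ1 : 1 ≤ δ)
    (hδd : ∀ j ∈ pvElig caps lvls M, M + δ ≤ caps.getD j 0)
    (hδo : ∀ j ∈ pvOth caps lvls M, M + δ ≤ lvls.getD j 0)
    (hδq : δ * ((pvElig caps lvls M).length : Int) ≤ W) :
    pw2_loop caps lvls fuel
      ((pvElig caps lvls M).foldl (fun c i => c.set i (c.getD i 0 + δ))
        (canon lvls (pvV caps lvls M)))
      (W - δ * ((pvElig caps lvls M).length : Int))
      = pour_water_2_alt caps lvls (pvCostF caps lvls M + W) := by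
  have hb : ∀ i ∈ pvElig caps lvls M, i < lvls.length := by
    intro i hi
    have := (pv_mem_elig caps lvls M i).mp hi
    omega
  have hk1 : (1 : Int) ≤ ((pvElig caps lvls M).length : Int) := by
    have : 0 < (pvElig caps lvls M).length :=
      List.length_pos_iff.mpr (pv_tight_elig_ne caps lvls hT)
    omega
  have hδk1 : 1 ≤ δ * ((pvElig caps lvls M).length : Int) := by
    have := mul_le_mul hδ1 hk1 (by norm_num) (by omega)
    omega
  rw [pv_addFold lvls δ (pvElig caps lvls M) (pvV caps lvls M)
    (pv_elig_nodup caps lvls M) hb]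
  have hpw : ∀ j, j < caps.length →
      (if j ∈ pvElig caps lvls M then pvV caps lvls M j + δ else pvV caps lvls M j)
        = pvV caps lvls (M + δ) j := by
    intro j hjn
    by_cases hje : j ∈ pvElig caps lvls M
    · have he := (pv_mem_elig caps lvls M j).mp hje
      have h2 := hδd j hje
      rw [if_pos hje]
      simp only [pvV]; split_ifs <;> omega
    · rw [if_neg hje]
      have hne' : ¬ (lvls.getD j 0 ≤ M ∧ M < caps.getD j 0) :=
        fun hc => hje ((pv_mem_elig caps lvls M j).mpr ⟨hjn, hc.1, hc.2⟩)
      by_cases hact : lvls.getD j 0 < caps.getD j 0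
      · by_cases hgt : M < lvls.getD j 0
        · have := hδo j ((pv_mem_oth caps lvls M j).mpr ⟨hjn, hact, hgt⟩)
          simp only [pvV]; split_ifs <;> omega
        · simp only [pvV]; split_ifs <;> omega
      · simp only [pvV]; split_ifs <;> omega
  have hcanpw : canon lvls (fun j => if j ∈ pvElig caps lvls M
      then pvV caps lvls M j + δ else pvV caps lvls M j)
        = canon lvls (pvV caps lvls (M + δ)) := by
    apply pv_canon_congr
    intro j hj
    by_cases hjn : j < caps.length
    · exact hpw j hjn
    · have h1 : j ∉ pvElig caps lvls M :=
        fun h => by have := (pv_mem_elig caps lvls M j).mp h; omega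
      rw [if_neg h1]
      simp only [pvV]
      rw [if_neg (fun hc => hjn hc.1), if_neg (fun hc => hjn hc.1)]
  rw [hcanpw]
  have hcost : pvCostF caps lvls (M + δ)
      = pvCostF caps lvls M + δ * ((pvElig caps lvls M).length : Int) :=
    pv_costF_of_pointwise caps lvls (fun j hj => by rw [← hpw j hj])
  by_cases hT' : pvTight caps lvls (M + δ)
  · rw [ih (W - δ * ((pvElig caps lvls M).length : Int)) (M + δ) (by omega) (by omega) hT']
    rw [hcost]
    congr 1
    ring
  · by_cases hful : pvOth caps lvls (M + δ) = []
    · -- all remaining water-reachable buckets are full at M + δ: the loop stops here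
      have hMδhi : M + δ ≤ pvHi caps lvls := by
        obtain ⟨j0, hj0, hl0, hc0⟩ := hT
        have hje : j0 ∈ pvElig caps lvls M := (pv_mem_elig caps lvls M j0).mpr ⟨hj0, hl0, hc0⟩
        have h1 := hδd j0 hje
        have hja : j0 ∈ pvActive caps lvls := (pv_mem_active caps lvls j0).mpr ⟨hj0, by omega⟩
        have h2 := (pv_maxD_spec ((pvActive caps lvls).map (fun i => caps.getD i 0))
          (by simp [List.ne_nil_of_mem hja])).2 (caps.getD j0 0)
          (List.mem_map.mpr ⟨j0, hja, rfl⟩)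
        rw [pvHi]; omega
      have hoth' : ∀ j, j < caps.length → lvls.getD j 0 < caps.getD j 0 →
          ¬ (M + δ < lvls.getD j 0) := by
        intro j hjn hact hgt
        have : j ∈ pvOth caps lvls (M + δ) :=
          (pv_mem_oth caps lvls (M + δ) j).mpr ⟨hjn, hact, hgt⟩
        rw [hful] at this
        exact absurd this (List.not_mem_nil)
      have hcfull : ∀ j, j < caps.length → lvls.getD j 0 < caps.getD j 0 →
          caps.getD j 0 ≤ M + δ := by
        intro j hjn hact
        by_contra hcc
        exact hT' ⟨j, hjn, by have := hoth' j hjn hact; omega, by omega⟩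
      have hnfl : pwA_nonfull caps (canon lvls (pvV caps lvls (M + δ))) = [] := by
        rw [pvA_nonfull_eq caps lvls (M + δ) hpre, pvNfl, List.filter_eq_nil_iff]
        intro j hjr
        have hjn := List.mem_range.mp hjr
        simp only [decide_eq_true_eq, not_lt]
        by_cases hact : lvls.getD j 0 < caps.getD j 0
        · have := hcfull j hjn hact
          simp only [pvV]; split_ifs <;> omega
        · simp only [pvV]; split_ifs <;> omega
      rw [pv_loop_stuck caps lvls fuel _ _ (Or.inr hnfl)]
      have hfull : ∀ j, j < caps.length →
          pvV caps lvls (pvHi caps lvls) j = pvV caps lvls (M + δ) j := by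
        intro j hjn
        by_cases hact : lvls.getD j 0 < caps.getD j 0
        · have h1 := hoth' j hjn hact
          have h2 := hcfull j hjn hact
          simp only [pvV]; split_ifs <;> omega
        · simp only [pvV]; split_ifs <;> omega
      obtain ⟨hactne, hloM, hhiM⟩ := pv_tight_bounds caps lvls hT
      rw [← pv_canon_V_congr caps lvls hfull]
      have hcosthi : pvCostF caps lvls (pvHi caps lvls) = pvCostF caps lvls (M + δ) :=
        pv_costF_congr caps lvls hfull
      rw [pv_alt_char caps lvls (pvCostF caps lvls M + W) (pvHi caps lvls) hpre
        (by have := pv_costF_nonneg caps lvls M; omega) hactne (le_trans hloM hhiM)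
        (le_refl _) (by rw [hcosthi, hcost]; omega) (fun h => absurd h (lt_irrefl _))]
      have helighi : pvElig caps lvls (pvHi caps lvls) = [] := by
        rw [pvElig, List.filter_eq_nil_iff]
        intro j hjr
        have hjn := List.mem_range.mp hjr
        simp only [decide_eq_true_eq, not_and]
        intro h1 h2
        have hact2 : lvls.getD j 0 < caps.getD j 0 := by omega
        have := hcfull j hjn hact2
        omega
      unfold pvNF
      rw [helighi]
      apply pv_canon_congr
      intro j hj
      simp
    · -- some bucket is still unfilled above M + δ: normalize the level to the least such
      have hmapne : (pvOth caps lvls (M + δ)).map (fun i => lvls.getD i 0) ≠ [] := by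
        simp [hful]
      obtain ⟨hmem, hle⟩ := pv_minD_spec _ hmapne
      obtain ⟨jm, hjm, hjmeq⟩ := List.mem_map.mp hmem
      have hjm' := (pv_mem_oth caps lvls (M + δ) jm).mp hjm
      have hT'' : pvTight caps lvls
          ((((pvOth caps lvls (M + δ)).map (fun i => lvls.getD i 0)).min?).getD 0) :=
        ⟨jm, hjm'.1, by omega, by omega⟩
      have hLgt : M + δ < (((pvOth caps lvls (M + δ)).map (fun i => lvls.getD i 0)).min?).getD 0 := by
        omega
      have hpw2 : ∀ j, j < caps.length →
          pvV caps lvls ((((pvOth caps lvls (M + δ)).map (fun i => lvls.getD i 0)).min?).getD 0) j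
            = pvV caps lvls (M + δ) j := by
        intro j hjn
        by_cases hact : lvls.getD j 0 < caps.getD j 0
        · by_cases hgt : M + δ < lvls.getD j 0
          · have hlej := hle (lvls.getD j 0)
              (List.mem_map.mpr ⟨j, (pv_mem_oth caps lvls (M + δ) j).mpr ⟨hjn, hact, hgt⟩, rfl⟩)
            simp only [pvV]; split_ifs <;> omega
          · have hcle : caps.getD j 0 ≤ M + δ := by
              by_contra hcc
              exact hT' ⟨j, hjn, by omega, by omega⟩
            simp only [pvV]; split_ifs <;> omega
        · simp only [pvV]; split_ifs <;> omega
      rw [← pv_canon_V_congr caps lvls hpw2]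
      rw [ih (W - δ * ((pvElig caps lvls M).length : Int))
        ((((pvOth caps lvls (M + δ)).map (fun i => lvls.getD i 0)).min?).getD 0)
        (by omega) (by omega) hT'']
      rw [pv_costF_congr caps lvls hpw2, hcost]
      congr 1
      ring


-- A's unit-by-unit remainder step: W < #minimum-buckets, one unit each to the first W of them
theorem pv_rem (caps lvls : List Int) (hpre : caps.length ≤ lvls.length)
    (fuel : Nat) (W M : Int) (hW : 0 < W) (hT : pvTight caps lvls M)
    (hWk : W < ((pvElig caps lvls M).length : Int)) :
    pw2_loop caps lvls fuel
      ((List.range (min W ((pvElig caps lvls M).length : Int)).toNat).foldl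
        (fun c j => c.set ((pvElig caps lvls M).getD j 0)
          (c.getD ((pvElig caps lvls M).getD j 0) 0 + 1))
        (canon lvls (pvV caps lvls M)))
      (W - min W ((pvElig caps lvls M).length : Int))
      = pour_water_2_alt caps lvls (pvCostF caps lvls M + W) := by
  have hmin : min W ((pvElig caps lvls M).length : Int) = W := min_eq_left (by omega)
  rw [hmin, sub_self]
  have htn : W.toNat ≤ (pvElig caps lvls M).length := by omega
  rw [pv_rangeIdxFold W.toNat (pvElig caps lvls M) htn]
  rw [pv_addFold lvls 1 ((pvElig caps lvls M).take W.toNat) (pvV caps lvls M)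
    (List.Sublist.nodup (List.take_sublist _ _) (pv_elig_nodup caps lvls M))
    (fun i hi => by
      have := (pv_mem_elig caps lvls M i).mp (List.mem_of_mem_take hi)
      omega)]
  rw [pv_loop_stuck caps lvls fuel _ 0 (Or.inl (le_refl 0))]
  obtain ⟨hactne, hloM, hhiM⟩ := pv_tight_bounds caps lvls hT
  rw [pv_alt_char caps lvls (pvCostF caps lvls M + W) M hpre
    (by have := pv_costF_nonneg caps lvls M; omega) hactne hloM hhiM (by omega)
    (fun _ => by rw [pv_costF_succ]; omega)]
  rw [add_sub_cancel_left]
  rfl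

-- ===== the main loop invariant: from a tight fill profile, A's loop computes B's answer =====
theorem pv_loop_eq (caps lvls : List Int) (hpre : caps.length ≤ lvls.length) :
    ∀ (fuel : Nat) (W M : Int), W.toNat ≤ fuel → 0 ≤ W → pvTight caps lvls M →
    pw2_loop caps lvls fuel (canon lvls (pvV caps lvls M)) W
      = pour_water_2_alt caps lvls (pvCostF caps lvls M + W) := by
  intro fuel
  induction fuel with
  | zero =>
    intro W M hf h0 hT
    have hW0 : W = 0 := by omega
    subst hW0
    rw [add_zero]
    exact pv_end caps lvls M hpre hT
  | succ fuel ih =>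
    intro W M hf h0 hT
    by_cases hW : 0 < W
    · have hnfl_ne : pvNfl caps lvls M ≠ [] := by
        obtain ⟨j0, hj0, hl0, hc0⟩ := hT
        exact List.ne_nil_of_mem ((pv_mem_nfl caps lvls M j0).mpr
          ⟨hj0, by simp only [pvV]; split_ifs <;> omega⟩)
      have helig_ne : pvElig caps lvls M ≠ [] := pv_tight_elig_ne caps lvls hT
      have hklen : 0 < (pvElig caps lvls M).length := List.length_pos_iff.mpr helig_ne
      have hk0 : (0 : Int) < ((pvElig caps lvls M).length : Int) := by omega
      simp only [pw2_loop]
      rw [if_pos hW, pvA_nonfull_eq caps lvls M hpre, if_neg hnfl_ne,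
        pvA_minc_eq caps lvls M hpre hT, pvA_cb_eq caps lvls M hpre, if_neg helig_ne,
        pvA_others_eq caps lvls M hpre, pvA_dmax_eq caps lvls M hpre,
        PySem.Int.floordiv_eq_ediv_of_pos hk0]
      -- facts about dmax
      have hdmaxne : (pvElig caps lvls M).map (fun i => caps.getD i 0 - M) ≠ [] := by
        simp [helig_ne]
      obtain ⟨hdmem, hdle⟩ := pv_minD_spec _ hdmaxne
      obtain ⟨jd, hjd, hjdeq⟩ := List.mem_map.mp hdmem
      have hjd' := (pv_mem_elig caps lvls M jd).mp hjd
      have hdmax1 : 1 ≤ (((pvElig caps lvls M).map (fun i => caps.getD i 0 - M)).min?).getD 0 := by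
        omega
      have hdmaxall : ∀ j ∈ pvElig caps lvls M,
          (((pvElig caps lvls M).map (fun i => caps.getD i 0 - M)).min?).getD 0
            ≤ caps.getD j 0 - M := by
        intro j hj
        exact hdle _ (List.mem_map.mpr ⟨j, hj, rfl⟩)
      -- facts about the integer division
      have hdm := Int.mul_ediv_add_emod W ((pvElig caps lvls M).length : Int)
      have hr0 := Int.emod_nonneg W (by omega : ((pvElig caps lvls M).length : Int) ≠ 0)
      have hrk := Int.emod_lt_of_pos W hk0
      have hq0 : 0 ≤ W / ((pvElig caps lvls M).length : Int) := Int.ediv_nonneg (by omega) (by omega)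
      have hqk : (W / ((pvElig caps lvls M).length : Int)) * ((pvElig caps lvls M).length : Int)
          ≤ W := by nlinarith
      rcases hom : ((pvOth caps lvls M).map (fun i => lvls.getD i 0)).min? with _ | nm
      · -- no non-full bucket above level M
        have hothe : pvOth caps lvls M = [] := by
          have := List.min?_eq_none_iff.mp hom
          exact List.map_eq_nil_iff.mp this
        simp only [pwA_delta, hom]
        by_cases hδ : 0 < min ((((pvElig caps lvls M).map (fun i => caps.getD i 0 - M)).min?).getD 0)
            (W / ((pvElig caps lvls M).length : Int))
        · rw [if_pos hδ]
          apply pv_step caps lvls hpre fuel W M _ ih hf hW hT (by omega)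
            (fun j hj => by have := hdmaxall j hj; omega)
            (fun j hj => by rw [hothe] at hj; exact absurd hj (List.not_mem_nil))
            (by
              have h1 : min ((((pvElig caps lvls M).map (fun i => caps.getD i 0 - M)).min?).getD 0)
                  (W / ((pvElig caps lvls M).length : Int))
                  ≤ W / ((pvElig caps lvls M).length : Int) := min_le_right _ _
              nlinarith)
        · rw [if_neg hδ]
          have hWk : W < ((pvElig caps lvls M).length : Int) := by
            have hq : W / ((pvElig caps lvls M).length : Int) ≤ 0 := by omega
            nlinarith
          exact pv_rem caps lvls hpre fuel W M hW hT hWk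
      · -- the least non-full level above M is nm
        obtain ⟨hnmem, hnle⟩ := List.min?_eq_some_iff.mp hom
        obtain ⟨jm, hjm, hjmeq⟩ := List.mem_map.mp hnmem
        have hjm' := (pv_mem_oth caps lvls M jm).mp hjm
        simp only [pwA_delta, hom]
        by_cases hδ : 0 < min (min (nm - M)
              ((((pvElig caps lvls M).map (fun i => caps.getD i 0 - M)).min?).getD 0))
            (W / ((pvElig caps lvls M).length : Int))
        · rw [if_pos hδ]
          apply pv_step caps lvls hpre fuel W M _ ih hf hW hT (by omega)
            (fun j hj => by have := hdmaxall j hj; omega)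
            (fun j hj => by
              have := hnle (lvls.getD j 0) (List.mem_map.mpr ⟨j, hj, rfl⟩)
              omega)
            (by
              have h1 : min (min (nm - M)
                    ((((pvElig caps lvls M).map (fun i => caps.getD i 0 - M)).min?).getD 0))
                  (W / ((pvElig caps lvls M).length : Int))
                  ≤ W / ((pvElig caps lvls M).length : Int) := min_le_right _ _
              nlinarith)
        · rw [if_neg hδ]
          have hWk : W < ((pvElig caps lvls M).length : Int) := by
            have hnm1 : 1 ≤ nm - M := by omega
            have hq : W / ((pvElig caps lvls M).length : Int) ≤ 0 := by omega
            nlinarith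
          exact pv_rem caps lvls hpre fuel W M hW hT hWk
    · have hW0 : W = 0 := by omega
      subst hW0
      rw [pv_loop_stuck caps lvls (fuel + 1) _ 0 (Or.inl (le_refl 0)), add_zero]
      exact pv_end caps lvls M hpre hT

-- ===== VERDICT (by name: the statement is the Claim_ definition above) =====
theorem pour_water_2_spec : Claim_equal_pour_water_2 := by
  intro caps lvls W _ hpre
  unfold Spec_pour_water_2
  by_cases hW : W ≤ 0
  · rw [show pour_water_2 caps lvls W = pw2_loop caps lvls W.toNat lvls W from rfl,
      pv_loop_stuck caps lvls _ _ _ (Or.inl hW)]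
    simp only [pour_water_2_alt]
    rw [if_pos hW]
  · unfold Pre_pour_water_2 at hpre
    have hlen : caps.length ≤ lvls.length := by
      rcases hpre with h | h
      · exact h
      · omega
    by_cases hact : pvActive caps lvls = []
    · rw [show pour_water_2 caps lvls W = pw2_loop caps lvls W.toNat lvls W from rfl,
        pv_loop_stuck caps lvls _ _ _ (Or.inr
          (by rw [show pwA_nonfull caps lvls = pvActive caps lvls from rfl]; exact hact))]
      simp only [pour_water_2_alt]
      rw [if_neg hW,
        show (List.range caps.length).filter
          (fun i => decide (lvls.getD i 0 < caps.getD i 0)) = pvActive caps lvls from rfl,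
        if_pos hact]
    · have hmapne : (pvActive caps lvls).map (fun i => lvls.getD i 0) ≠ [] := by
        simp [hact]
      obtain ⟨hmem, hle⟩ := pv_minD_spec _ hmapne
      obtain ⟨j0, hj0, hj0eq⟩ := List.mem_map.mp hmem
      have hj0' := (pv_mem_active caps lvls j0).mp hj0
      have hT : pvTight caps lvls (pvLo caps lvls) :=
        ⟨j0, hj0'.1, by rw [pvLo]; omega, by rw [pvLo]; omega⟩
      have hle' : ∀ j, j < caps.length → lvls.getD j 0 < caps.getD j 0 →
          pvLo caps lvls ≤ lvls.getD j 0 := by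
        intro j hjn hactj
        rw [pvLo]
        exact hle _ (List.mem_map.mpr ⟨j, (pv_mem_active caps lvls j).mpr ⟨hjn, hactj⟩, rfl⟩)
      have hcan : canon lvls (pvV caps lvls (pvLo caps lvls)) = lvls := by
        calc canon lvls (pvV caps lvls (pvLo caps lvls))
            = canon lvls (fun j => lvls.getD j 0) := by
              apply pv_canon_congr
              intro j hj
              by_cases hjn : j < caps.length
              · by_cases hactj : lvls.getD j 0 < caps.getD j 0
                · have := hle' j hjn hactj
                  simp only [pvV]; split_ifs <;> omega
                · simp only [pvV]; split_ifs <;> omega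
              · simp only [pvV]; rw [if_neg (fun hc => hjn hc.1)]
          _ = lvls := pv_canon_self lvls
      have hcost0 : pvCostF caps lvls (pvLo caps lvls) = 0 := by
        apply Finset.sum_eq_zero
        intro j hj
        have hjn := Finset.mem_range.mp hj
        by_cases hactj : lvls.getD j 0 < caps.getD j 0
        · have := hle' j hjn hactj
          simp only [pvV]; split_ifs <;> omega
        · simp only [pvV]; split_ifs <;> omega
      have hmain := pv_loop_eq caps lvls hlen W.toNat W (pvLo caps lvls)
        (le_refl _) (by omega) hT
      rw [hcan] at hmain
      rw [show pour_water_2 caps lvls W = pw2_loop caps lvls W.toNat lvls W from rfl,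
        hmain, hcost0, zero_add]
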